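-- pv_equiv track=rewrite | github.com/dwmkerr/hacker-laws | .github/website/generate.py | bisect_text
-- ===== SOURCE A (Python) =====
-- def bisect_text(content: str, bisect_line: str) -> tuple[str, str]:
--     lines = content.splitlines()
--     head = []
--     tail = []
--     found = False
--     for line in lines:
--         if found is False and line == bisect_line:
--             found = True
--             continue
--         if found:
--             tail.append(line)
--         else:
--             head.append(line)
--
--     return ("\n".join(head), "\n".join(tail))
-- ===== SOURCE B (Python) =====
-- def bisect_text(content: str, bisect_line: str) -> tuple[str, str]:
--     lines = content.splitlines()
--     try:
--         idx = lines.index(bisect_line)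
--     except ValueError:
--         return ("\n".join(lines), "")
--     return ("\n".join(lines[:idx]), "\n".join(lines[idx + 1:]))
-- ===== Notes on version B (the rewrite author's own statement) =====
-- stated objective: simpler
-- what changed: Replaces the single-pass flagged accumulation into head/tail lists by locate-then-slice: find the first matching line with list.index and slice before/after it.
import Mathlib
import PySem

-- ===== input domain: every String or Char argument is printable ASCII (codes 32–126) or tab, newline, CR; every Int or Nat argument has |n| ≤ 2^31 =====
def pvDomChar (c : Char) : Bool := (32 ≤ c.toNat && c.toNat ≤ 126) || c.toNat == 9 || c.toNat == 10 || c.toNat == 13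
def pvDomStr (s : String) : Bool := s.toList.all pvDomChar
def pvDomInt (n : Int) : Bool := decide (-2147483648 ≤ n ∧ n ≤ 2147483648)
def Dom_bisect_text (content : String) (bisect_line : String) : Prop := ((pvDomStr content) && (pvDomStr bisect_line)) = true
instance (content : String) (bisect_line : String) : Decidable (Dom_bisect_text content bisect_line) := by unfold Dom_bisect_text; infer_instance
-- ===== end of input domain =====

-- B changes the decomposition only (locate-then-slice instead of a flagged single pass); same behaviour.
-- ===== PORT A =====
def bisect_text (content : String) (bisect_line : String) : String × String :=
  let lines := PySem.Str.splitlines content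
  let st := lines.foldl (fun (st : Bool × List String × List String) line =>
      let (found, head, tail) := st
      if found = false ∧ line = bisect_line then (true, head, tail)
      else if found then (found, head, tail ++ [line])
      else (found, head ++ [line], tail))
    (false, [], [])
  (PySem.Str.join "\n" st.2.1, PySem.Str.join "\n" st.2.2)

-- ===== PORT B =====
def bisect_text_alt (content : String) (bisect_line : String) : String × String :=
  let lines := PySem.Str.splitlines content
  match PySem.List.index? lines bisect_line with
  | none => (PySem.Str.join "\n" lines, "")
  | some idx =>
      (PySem.Str.join "\n" (PySem.List.slice lines none (some (idx : Int))),
       PySem.Str.join "\n" (PySem.List.slice lines (some ((idx : Int) + 1)) none))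

-- ===== PRECONDITION & SPEC =====
def Spec_bisect_text (content : String) (bisect_line : String) (out : String × String) : Prop := out = bisect_text_alt content bisect_line
instance (content : String) (bisect_line : String) (out : String × String) : Decidable (Spec_bisect_text content bisect_line out) := by unfold Spec_bisect_text; infer_instance

-- ===== CLAIM (what is proved, stated in full; the proofs are below) =====
def Claim_equal_bisect_text : Prop := ∀ (content : String) (bisect_line : String), Dom_bisect_text content bisect_line → Spec_bisect_text content bisect_line (bisect_text content bisect_line)

-- ===== LEMMAS AND PROOFS =====

def pvStep (v : String) (st : Bool × List String × List String) (line : String) :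
    Bool × List String × List String :=
  let (found, head, tail) := st
  if found = false ∧ line = v then (true, head, tail)
  else if found then (found, head, tail ++ [line])
  else (found, head ++ [line], tail)

theorem pvJoin_nil : PySem.Str.join "\n" [] = "" := by decide

theorem pvLoop_found (v : String) (xs : List String) (h t : List String) :
    xs.foldl (pvStep v) (true, h, t) = (true, h, t ++ xs) := by
  induction xs generalizing t with
  | nil => simp
  | cons x xs ih => simp [pvStep, ih]

theorem pvLoop_eq (v : String) (xs : List String) (h : List String) :
    xs.foldl (pvStep v) (false, h, []) =
      match PySem.List.index? xs v with
      | none => (false, h ++ xs, [])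
      | some i => (true, h ++ xs.take i, xs.drop (i + 1)) := by
  induction xs generalizing h with
  | nil => simp [PySem.List.index?]
  | cons x xs ih =>
    by_cases hx : x = v
    · subst hx
      rw [PySem.List.index?_cons_self]
      simp [pvStep, pvLoop_found]
    · rw [PySem.List.index?_cons_of_ne xs hx]
      have hstep : List.foldl (pvStep v) (false, h, []) (x :: xs)
          = List.foldl (pvStep v) (false, h ++ [x], []) xs := by
        simp [pvStep, hx]
      rw [hstep, ih (h ++ [x])]
      cases hidx : PySem.List.index? xs v with
      | none => simp [List.append_assoc]
      | some i => simp [List.append_assoc]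

-- ===== VERDICT (by name: the statement is the Claim_ definition above) =====
theorem bisect_text_spec : Claim_equal_bisect_text := by
  intro content bisect_line _
  unfold Spec_bisect_text bisect_text bisect_text_alt
  dsimp only
  have hfold : ∀ (xs : List String) (st : Bool × List String × List String),
      xs.foldl (fun st line =>
        let (found, head, tail) := st
        if found = false ∧ line = bisect_line then (true, head, tail)
        else if found then (found, head, tail ++ [line])
        else (found, head ++ [line], tail)) st
      = xs.foldl (pvStep bisect_line) st := by
    intro xs st; rfl
  rw [hfold, pvLoop_eq]
  cases hidx : PySem.List.index? (PySem.Str.splitlines content) bisect_line with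
  | none =>
    simp only [List.nil_append, pvJoin_nil]
  | some i =>
    simp only [List.nil_append, PySem.List.slice_to_natCast]
    have h2 := PySem.List.slice_from_natCast (PySem.Str.splitlines content) (i + 1)
    push_cast at h2
    rw [h2]
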